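-- pv_equiv track=rewrite | github.com/ishaanshekhawat/PythonPractice | Two Sum Par 3.py | max_two_sum
-- ===== SOURCE A (Python) =====
-- def max_two_sum(nums, k):
-- 	# Initialize maxSum to negative infinity to represent no valid sum found yet
-- 	maxSum = float('-inf')
--
-- 	# Iterate through all possible pairs (i, j) where i < j
-- 	for i in range(len(nums)-1):
-- 		for j in range(i+1, len(nums)):
-- 			# Check if the current pair sum is less than k
-- 			# and greater than the current maxSum found so far
-- 			if nums[i] + nums[j] < k and maxSum < nums[i] + nums[j]:
-- 				# Update maxSum with this new valid pair sum
-- 				maxSum = nums[i] + nums[j]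
--
-- 	# If we found at least one valid pair, return the largest sum found
-- 	if maxSum != float('-inf'):
-- 		return maxSum
--
-- 	# If no valid pair sum < k was found, return -1
-- 	return -1
-- ===== SOURCE B (Python) =====
-- def max_two_sum(nums, k):
--     # Sort then sweep with two pointers, tracking the best pair sum < k.
--     s = sorted(nums)
--     lo, hi = 0, len(s) - 1
--     best = None
--     while lo < hi:
--         t = s[lo] + s[hi]
--         if t < k:
--             if best is None or best < t:
--                 best = t
--             lo += 1
--         else:
--             hi -= 1
--     return best if best is not None else -1
-- ===== Notes on version B (the rewrite author's own statement) =====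
-- stated objective: faster
-- what changed: Replaced A's O(n^2) scan over all index pairs with sorting the list once and a two-pointer sweep that tracks the best pair sum below k.
import Mathlib
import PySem

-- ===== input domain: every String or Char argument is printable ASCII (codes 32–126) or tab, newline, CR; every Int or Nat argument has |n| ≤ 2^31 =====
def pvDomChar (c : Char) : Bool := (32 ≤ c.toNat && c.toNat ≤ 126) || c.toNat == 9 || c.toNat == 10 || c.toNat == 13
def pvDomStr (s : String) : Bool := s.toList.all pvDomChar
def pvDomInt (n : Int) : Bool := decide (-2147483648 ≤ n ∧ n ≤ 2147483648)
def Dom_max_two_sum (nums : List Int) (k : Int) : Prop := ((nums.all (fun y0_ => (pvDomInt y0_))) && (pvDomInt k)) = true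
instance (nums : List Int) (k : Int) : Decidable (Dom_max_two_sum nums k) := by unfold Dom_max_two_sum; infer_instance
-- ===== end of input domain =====

-- B replaces A's quadratic all-pairs scan by sort + two-pointer sweep (O(n log n)); same return value.

-- ===== PORT A =====
-- Literal port of A: nested index loops, running maximum (none = float('-inf')), -1 if never set.
def max_two_sum (nums : List Int) (k : Int) : Int :=
  match (PySem.List.pyRange 0 ((nums.length : Int) - 1) 1).foldl (fun acc i =>
      (PySem.List.pyRange (i + 1) (nums.length : Int) 1).foldl (fun acc j =>
        if PySem.List.pyGetD nums i 0 + PySem.List.pyGetD nums j 0 < k ∧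
           acc.all (fun m => decide (m < PySem.List.pyGetD nums i 0 + PySem.List.pyGetD nums j 0)) = true
        then some (PySem.List.pyGetD nums i 0 + PySem.List.pyGetD nums j 0)
        else acc) acc) none with
  | some m => m
  | none => -1

-- ===== PORT B =====
-- the while-loop of Source B: lo/hi pointers over the sorted list, best = None until a valid pair is seen
def twoSumGo (s : List Int) (k : Int) (lo hi : Nat) (best : Option Int) : Option Int :=
  if h : lo < hi then
    if s.getD lo 0 + s.getD hi 0 < k then
      twoSumGo s k (lo + 1) hi
        (match best with
         | none => some (s.getD lo 0 + s.getD hi 0)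
         | some b => if b < s.getD lo 0 + s.getD hi 0 then some (s.getD lo 0 + s.getD hi 0) else some b)
    else
      twoSumGo s k lo (hi - 1) best
  else best
termination_by hi - lo
decreasing_by all_goals omega

def max_two_sum_alt (nums : List Int) (k : Int) : Int :=
  let s := PySem.List.sorted nums (fun x => x) false
  match twoSumGo s k 0 (s.length - 1) none with
  | some b => b
  | none => -1

-- ===== PRECONDITION & SPEC =====
def Spec_max_two_sum (nums : List Int) (k : Int) (out : Int) : Prop := out = max_two_sum_alt nums k
instance (nums : List Int) (k : Int) (out : Int) : Decidable (Spec_max_two_sum nums k out) := by unfold Spec_max_two_sum; infer_instance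

-- ===== CLAIM (what is proved, stated in full; the proofs are below) =====
def Claim_equal_max_two_sum : Prop := ∀ (nums : List Int) (k : Int), Dom_max_two_sum nums k → Spec_max_two_sum nums k (max_two_sum nums k)

-- ===== LEMMAS AND PROOFS =====

-- option-valued maximum combination (none = -inf)
def obmax : Option Int → Option Int → Option Int
  | none, b => b
  | some x, none => some x
  | some x, some y => some (max x y)

-- sums of all pairs (i, j) with lo ≤ i < j ≤ hi, by index
def winList (s : List Int) (lo hi : Nat) : List Int :=
  (List.range' lo (hi + 1 - lo)).flatMap (fun i =>
    (List.range' (i + 1) (hi - i)).map (fun j => s.getD i 0 + s.getD j 0))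

-- maximum valid (< k) pair sum in the index window
def wmax (s : List Int) (k : Int) (lo hi : Nat) : Option Int :=
  ((winList s lo hi).filter (fun v => decide (v < k))).max?

def ansOf : Option Int → Int
  | some m => m
  | none => -1

-- pair sums, structurally
def pairSums : List Int → List Int
  | [] => []
  | x :: t => t.map (x + ·) ++ pairSums t

theorem obmax_none_right (a : Option Int) : obmax a none = a := by cases a <;> rfl

theorem obmax_assoc (a b c : Option Int) : obmax (obmax a b) c = obmax a (obmax b c) := by
  cases a <;> cases b <;> cases c <;> simp [obmax, max_assoc]

theorem max?_cons_obmax (v : Int) (l : List Int) : (v :: l).max? = obmax (some v) l.max? := by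
  cases l with
  | nil => rfl
  | cons y t => simp [List.max?, obmax, List.foldl_assoc]

theorem max?_congr {l l' : List Int} (h : ∀ x, x ∈ l ↔ x ∈ l') : l.max? = l'.max? := by
  rcases hl' : l'.max? with _ | m
  · rw [List.max?_eq_none_iff] at hl' ⊢
    subst hl'
    cases hl : l with
    | nil => rfl
    | cons x t => exact absurd ((h x).1 (by simp [hl])) (by simp)
  · rw [List.max?_eq_some_iff] at hl' ⊢
    exact ⟨(h m).2 hl'.1, fun b hb => hl'.2 b ((h b).1 hb)⟩

theorem mem_winList {s : List Int} {lo hi : Nat} {v : Int} :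
    v ∈ winList s lo hi ↔ ∃ i j, lo ≤ i ∧ i < j ∧ j ≤ hi ∧ v = s.getD i 0 + s.getD j 0 := by
  simp only [winList, List.mem_flatMap, List.mem_range'_1, List.mem_map]
  constructor
  · rintro ⟨i, ⟨hi1, hi2⟩, j, ⟨hj1, hj2⟩, rfl⟩
    exact ⟨i, j, by omega, by omega, by omega, rfl⟩
  · rintro ⟨i, j, h1, h2, h3, rfl⟩
    exact ⟨i, ⟨by omega, by omega⟩, j, ⟨by omega, by omega⟩, rfl⟩

theorem mem_fwin {s : List Int} {k : Int} {lo hi : Nat} {v : Int} :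
    v ∈ (winList s lo hi).filter (fun v => decide (v < k)) ↔
      (∃ i j, lo ≤ i ∧ i < j ∧ j ≤ hi ∧ v = s.getD i 0 + s.getD j 0) ∧ v < k := by
  simp [List.mem_filter, mem_winList]

theorem sorted_getD_mono {s : List Int} (hp : s.Pairwise (· ≤ ·)) {i j : Nat}
    (hij : i ≤ j) (hj : j < s.length) : s.getD i 0 ≤ s.getD j 0 := by
  rcases lt_or_eq_of_le hij with h | h
  · rw [List.getD_eq_getElem _ _ (by omega), List.getD_eq_getElem _ _ hj]
    exact List.pairwise_iff_getElem.mp hp i j (by omega) hj h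
  · subst h; rfl

theorem wmax_none_of_ge {s : List Int} {k : Int} {lo hi : Nat} (h : hi ≤ lo) :
    wmax s k lo hi = none := by
  rw [wmax, List.max?_eq_none_iff, List.eq_nil_iff_forall_not_mem]
  intro x hx
  rcases mem_fwin.mp hx with ⟨⟨i, j, h1, h2, h3, _⟩, _⟩
  omega

theorem wmax_step_lo {s : List Int} {k : Int} {lo hi : Nat} (hp : s.Pairwise (· ≤ ·))
    (hlh : lo < hi) (hh : hi < s.length) (ht : s.getD lo 0 + s.getD hi 0 < k) :
    wmax s k lo hi = obmax (some (s.getD lo 0 + s.getD hi 0)) (wmax s k (lo + 1) hi) := by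
  have hle : ∀ {i j : Nat}, lo ≤ i → i < j → j ≤ hi → s.getD i 0 + s.getD j 0 < k →
      s.getD i 0 + s.getD j 0 ≤ s.getD lo 0 + s.getD hi 0 ∨
      s.getD i 0 + s.getD j 0 ∈ (winList s (lo + 1) hi).filter (fun v => decide (v < k)) := by
    intro i j h1 h2 h3 hv
    by_cases hi0 : i = lo
    · subst hi0
      left
      have := sorted_getD_mono hp (i := j) (j := hi) h3 hh
      omega
    · right
      exact mem_fwin.mpr ⟨⟨i, j, by omega, h2, h3, rfl⟩, hv⟩
  rcases hm : wmax s k (lo + 1) hi with _ | m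
  · rw [wmax]
    show _ = some _
    rw [List.max?_eq_some_iff]
    constructor
    · exact mem_fwin.mpr ⟨⟨lo, hi, le_refl _, hlh, le_refl _, rfl⟩, ht⟩
    · intro b hb
      rcases mem_fwin.mp hb with ⟨⟨i, j, h1, h2, h3, rfl⟩, hv⟩
      rcases hle h1 h2 h3 hv with h | h
      · exact h
      · rw [wmax, List.max?_eq_none_iff] at hm
        rw [hm] at h
        cases h
  · rw [wmax, List.max?_eq_some_iff] at hm
    rw [wmax]
    show _ = some (max _ m)
    rw [List.max?_eq_some_iff]
    constructor
    · rcases le_total (s.getD lo 0 + s.getD hi 0) m with h | h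
      · rw [max_eq_right h]
        rcases mem_fwin.mp hm.1 with ⟨⟨i, j, h1, h2, h3, rfl⟩, hv⟩
        exact mem_fwin.mpr ⟨⟨i, j, by omega, h2, h3, rfl⟩, hv⟩
      · rw [max_eq_left h]
        exact mem_fwin.mpr ⟨⟨lo, hi, le_refl _, hlh, le_refl _, rfl⟩, ht⟩
    · intro b hb
      rcases mem_fwin.mp hb with ⟨⟨i, j, h1, h2, h3, rfl⟩, hv⟩
      rcases hle h1 h2 h3 hv with h | h
      · exact le_max_of_le_left h
      · exact le_max_of_le_right (hm.2 _ h)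

theorem wmax_step_hi {s : List Int} {k : Int} {lo hi : Nat} (hp : s.Pairwise (· ≤ ·))
    (hlh : lo < hi) (hh : hi < s.length) (ht : ¬ s.getD lo 0 + s.getD hi 0 < k) :
    wmax s k lo hi = wmax s k lo (hi - 1) := by
  apply max?_congr
  intro x
  simp only [mem_fwin]
  constructor
  · rintro ⟨⟨i, j, h1, h2, h3, rfl⟩, hv⟩
    have hj : j ≠ hi := by
      intro hj; subst hj
      have := sorted_getD_mono hp (i := lo) (j := i) h1 (by omega)
      omega
    exact ⟨⟨i, j, h1, h2, by omega, rfl⟩, hv⟩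
  · rintro ⟨⟨i, j, h1, h2, h3, rfl⟩, hv⟩
    exact ⟨⟨i, j, h1, h2, by omega, rfl⟩, hv⟩

theorem twoSumGo_spec (s : List Int) (k : Int) (hp : s.Pairwise (· ≤ ·)) :
    ∀ (fuel lo hi : Nat) (best : Option Int), hi - lo ≤ fuel → hi < s.length →
      twoSumGo s k lo hi best = obmax best (wmax s k lo hi) := by
  intro fuel
  induction fuel with
  | zero =>
    intro lo hi best hf hh
    rw [twoSumGo.eq_def]
    simp only [show ¬ lo < hi by omega, dif_neg, not_false_iff]
    rw [wmax_none_of_ge (by omega), obmax_none_right]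
  | succ fuel ih =>
    intro lo hi best hf hh
    rw [twoSumGo.eq_def]
    by_cases hlh : lo < hi
    · rw [dif_pos hlh]
      by_cases ht : s.getD lo 0 + s.getD hi 0 < k
      · rw [if_pos ht, ih (lo + 1) hi _ (by omega) hh, wmax_step_lo hp hlh hh ht,
            ← obmax_assoc]
        congr 1
        cases best with
        | none => rfl
        | some b =>
          simp only [obmax]
          split_ifs with hb
          · rw [max_eq_right (le_of_lt hb)]
          · rw [max_eq_left (by omega)]
      · rw [if_neg ht, ih lo (hi - 1) _ (by omega) (by omega),
            wmax_step_hi hp hlh hh ht]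
    · rw [dif_neg hlh]
      rw [wmax_none_of_ge (by omega), obmax_none_right]

theorem B_eq (nums : List Int) (k : Int) :
    max_two_sum_alt nums k =
      ansOf (wmax (PySem.List.sorted nums (fun x => x) false) k 0
        ((PySem.List.sorted nums (fun x => x) false).length - 1)) := by
  show ansOf (twoSumGo (PySem.List.sorted nums (fun x => x) false) k 0
      ((PySem.List.sorted nums (fun x => x) false).length - 1) none) = _
  set s := PySem.List.sorted nums (fun x => x) false with hs
  have hp : s.Pairwise (· ≤ ·) := PySem.List.sorted_pairwise nums (fun x => x)
  by_cases hne : s = []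
  · rw [hne, twoSumGo.eq_def]
    simp [wmax_none_of_ge, ansOf]
  · have hlen : s.length - 1 < s.length := by
      have : s.length ≠ 0 := fun h => hne (List.eq_nil_of_length_eq_zero h)
      omega
    rw [twoSumGo_spec s k hp (s.length - 1) 0 (s.length - 1) none (le_refl _) hlen]
    cases wmax s k 0 (s.length - 1) <;> rfl

-- one update step of A's running maximum
def stepf (k : Int) (acc : Option Int) (v : Int) : Option Int :=
  if v < k ∧ acc.all (fun m => decide (m < v)) = true then some v else acc

-- the list of pair sums A visits, in visit order
def LA (nums : List Int) : List Int :=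
  (PySem.List.pyRange 0 ((nums.length : Int) - 1) 1).flatMap (fun i =>
    (PySem.List.pyRange (i + 1) (nums.length : Int) 1).map
      (fun j => PySem.List.pyGetD nums i 0 + PySem.List.pyGetD nums j 0))

theorem stepf_eq_obmax (k : Int) (acc : Option Int) (v : Int) (hv : v < k) :
    stepf k acc v = obmax acc (some v) := by
  cases acc with
  | none => simp [stepf, obmax, hv]
  | some m =>
    simp only [stepf, obmax, Option.all_some]
    split_ifs with h <;> simp_all <;> omega

theorem stepf_eq_self (k : Int) (acc : Option Int) (v : Int) (hv : ¬ v < k) :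
    stepf k acc v = acc := by
  cases acc <;> simp [stepf, hv]

theorem foldl_flatMap' {α β γ : Type} (l : List α) (g : α → List β) (f : γ → β → γ) (a : γ) :
    (l.flatMap g).foldl f a = l.foldl (fun a x => (g x).foldl f a) a := by
  induction l generalizing a with
  | nil => rfl
  | cons x t ih => simp [List.flatMap_cons, List.foldl_append, ih]

theorem foldl_step (k : Int) (L : List Int) (acc : Option Int) :
    L.foldl (stepf k) acc = obmax acc ((L.filter (fun v => decide (v < k))).max?) := by
  induction L generalizing acc with
  | nil => cases acc <;> rfl
  | cons v L ih =>
    rw [List.foldl_cons, ih, List.filter_cons]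
    by_cases hv : v < k
    · simp only [hv, decide_true, if_true, max?_cons_obmax, ← obmax_assoc,
        stepf_eq_obmax k acc v hv]
    · simp [hv, stepf_eq_self k acc v hv]

theorem mem_LA {nums : List Int} {v : Int} :
    v ∈ LA nums ↔ ∃ i j : Nat, i < j ∧ j < nums.length ∧ v = nums.getD i 0 + nums.getD j 0 := by
  simp only [LA, List.mem_flatMap, PySem.List.mem_pyRange_one, List.mem_map]
  constructor
  · rintro ⟨i, ⟨hi0, hi1⟩, j, ⟨hj0, hj1⟩, rfl⟩
    have hic : i = (i.toNat : Int) := by omega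
    have hjc : j = (j.toNat : Int) := by omega
    refine ⟨i.toNat, j.toNat, by omega, by omega, ?_⟩
    rw [hic, hjc, PySem.List.pyGetD_natCast, PySem.List.pyGetD_natCast]
    simp only [Int.toNat_natCast]
  · rintro ⟨i, j, hij, hjl, rfl⟩
    refine ⟨(i : Int), ⟨by omega, by omega⟩, (j : Int), ⟨by omega, by omega⟩, ?_⟩
    rw [PySem.List.pyGetD_natCast, PySem.List.pyGetD_natCast]

theorem A_fold (nums : List Int) (k : Int) :
    (PySem.List.pyRange 0 ((nums.length : Int) - 1) 1).foldl (fun acc i =>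
      (PySem.List.pyRange (i + 1) (nums.length : Int) 1).foldl (fun acc j =>
        if PySem.List.pyGetD nums i 0 + PySem.List.pyGetD nums j 0 < k ∧
           acc.all (fun m => decide (m < PySem.List.pyGetD nums i 0 + PySem.List.pyGetD nums j 0)) = true
        then some (PySem.List.pyGetD nums i 0 + PySem.List.pyGetD nums j 0)
        else acc) acc) none
    = wmax nums k 0 (nums.length - 1) := by
  have h1 : (PySem.List.pyRange 0 ((nums.length : Int) - 1) 1).foldl (fun acc i =>
      (PySem.List.pyRange (i + 1) (nums.length : Int) 1).foldl (fun acc j =>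
        if PySem.List.pyGetD nums i 0 + PySem.List.pyGetD nums j 0 < k ∧
           acc.all (fun m => decide (m < PySem.List.pyGetD nums i 0 + PySem.List.pyGetD nums j 0)) = true
        then some (PySem.List.pyGetD nums i 0 + PySem.List.pyGetD nums j 0)
        else acc) acc) none
      = (LA nums).foldl (stepf k) none := by
    rw [LA, foldl_flatMap']
    congr 1
    funext acc i
    exact (List.foldl_map
      (g := stepf k)
      (f := fun j => PySem.List.pyGetD nums i 0 + PySem.List.pyGetD nums j 0)).symm
  rw [h1, foldl_step]
  show ((LA nums).filter (fun v => decide (v < k))).max? = _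
  apply max?_congr
  intro x
  simp only [List.mem_filter, mem_LA, mem_winList]
  constructor
  · rintro ⟨⟨i, j, h1, h2, rfl⟩, hx⟩
    exact ⟨⟨i, j, by omega, h1, by omega, rfl⟩, hx⟩
  · rintro ⟨⟨i, j, h0, h1, h2, rfl⟩, hx⟩
    exact ⟨⟨i, j, h1, by omega, rfl⟩, hx⟩

theorem A_eq (nums : List Int) (k : Int) :
    max_two_sum nums k = ansOf (wmax nums k 0 (nums.length - 1)) := by
  unfold max_two_sum
  rw [A_fold]
  cases wmax nums k 0 (nums.length - 1) <;> rfl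

theorem mem_pairSums {l : List Int} {v : Int} :
    v ∈ pairSums l ↔ ∃ i j, i < j ∧ j < l.length ∧ v = l.getD i 0 + l.getD j 0 := by
  induction l with
  | nil => simp [pairSums]
  | cons x t ih =>
    simp only [pairSums, List.mem_append, List.mem_map, ih]
    constructor
    · rintro (⟨y, hy, rfl⟩ | ⟨i, j, hij, hj, rfl⟩)
      · rcases List.mem_iff_getElem.mp hy with ⟨j, hj, rfl⟩
        refine ⟨0, j + 1, by omega, by simp; omega, ?_⟩
        rw [List.getD_cons_zero, List.getD_cons_succ, List.getD_eq_getElem _ _ hj]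
      · exact ⟨i + 1, j + 1, by omega, by simp; omega, by
          rw [List.getD_cons_succ, List.getD_cons_succ]⟩
    · rintro ⟨i, j, hij, hj, rfl⟩
      have hj' : j - 1 < t.length := by simp at hj; omega
      have hjeq : j = (j - 1) + 1 := by omega
      cases i with
      | zero =>
        left
        refine ⟨t.getD (j - 1) 0, ?_, ?_⟩
        · rw [List.getD_eq_getElem _ _ hj']
          exact List.getElem_mem _
        · rw [hjeq, List.getD_cons_zero, List.getD_cons_succ]
          simp
      | succ i =>
        right
        refine ⟨i, j - 1, by omega, hj', ?_⟩
        rw [hjeq, List.getD_cons_succ, List.getD_cons_succ]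
        simp

theorem pairSums_perm {l l' : List Int} (h : l.Perm l') : (pairSums l).Perm (pairSums l') := by
  induction h with
  | nil => exact List.Perm.refl _
  | cons x h ih => exact List.Perm.append (h.map _) ih
  | swap x y l =>
    simp only [pairSums, List.map_cons, List.cons_append]
    rw [add_comm y x]
    refine List.Perm.cons _ (List.perm_append_comm_assoc _ _ _)
  | trans h1 h2 ih1 ih2 => exact ih1.trans ih2

theorem winList_full_mem {l : List Int} {v : Int} :
    v ∈ winList l 0 (l.length - 1) ↔ v ∈ pairSums l := by
  rw [mem_winList, mem_pairSums]
  constructor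
  · rintro ⟨i, j, h0, h1, h2, rfl⟩
    exact ⟨i, j, h1, by omega, rfl⟩
  · rintro ⟨i, j, h1, h2, rfl⟩
    exact ⟨i, j, by omega, h1, by omega, rfl⟩

theorem wmax_full_perm (nums : List Int) (k : Int) :
    wmax nums k 0 (nums.length - 1) =
      wmax (PySem.List.sorted nums (fun x => x) false) k 0
        ((PySem.List.sorted nums (fun x => x) false).length - 1) := by
  apply max?_congr
  intro x
  simp only [List.mem_filter]
  have hperm : (pairSums nums).Perm
      (pairSums (PySem.List.sorted nums (fun x => x) false)) :=
    pairSums_perm (PySem.List.sorted_perm nums (fun x => x) false).symm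
  rw [winList_full_mem, winList_full_mem, hperm.mem_iff]

-- ===== VERDICT (by name: the statement is the Claim_ definition above) =====
theorem max_two_sum_spec : Claim_equal_max_two_sum := by
  intro nums k _
  unfold Spec_max_two_sum
  rw [A_eq, B_eq, wmax_full_perm]
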